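-- pv_equiv track=rewrite | github.com/GeekSky98/Algorithm_lab | Baekjoon/Gold/램프/explanation.py | solution
-- ===== SOURCE A (Python) =====
-- from collections import defaultdict
--
-- def solution(table, k, row, col):
--     answer = 0
--     table_dic = defaultdict(int)
--     for t in table:
--         table_dic[t] += 1
--
--     for pattern, count in table_dic.items():
--         cnt = pattern.count('0')
--         if cnt <= k and (k - cnt) % 2 == 0:
--             answer = max(answer, count)
--     return answer
-- ===== SOURCE B (Python) =====
-- def solution(table, k, row, col):
--     answer = 0
--     prev = None
--     run = 0
--     for t in sorted(table):
--         if t == prev: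
--             run += 1
--         else:
--             prev = t
--             run = 1
--         cnt = t.count('0')
--         if cnt <= k and (k - cnt) % 2 == 0:
--             answer = max(answer, run)
--     return answer
-- ===== Notes on version B (the rewrite author's own statement) =====
-- stated objective: alternative
-- what changed: Replaces the defaultdict grouping pass plus a second loop over dict items by sorting a copy of table and doing one linear scan that tracks the current pattern and its consecutive run length, taking the max run over eligible patterns; no dictionary is built.
import Mathlib
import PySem

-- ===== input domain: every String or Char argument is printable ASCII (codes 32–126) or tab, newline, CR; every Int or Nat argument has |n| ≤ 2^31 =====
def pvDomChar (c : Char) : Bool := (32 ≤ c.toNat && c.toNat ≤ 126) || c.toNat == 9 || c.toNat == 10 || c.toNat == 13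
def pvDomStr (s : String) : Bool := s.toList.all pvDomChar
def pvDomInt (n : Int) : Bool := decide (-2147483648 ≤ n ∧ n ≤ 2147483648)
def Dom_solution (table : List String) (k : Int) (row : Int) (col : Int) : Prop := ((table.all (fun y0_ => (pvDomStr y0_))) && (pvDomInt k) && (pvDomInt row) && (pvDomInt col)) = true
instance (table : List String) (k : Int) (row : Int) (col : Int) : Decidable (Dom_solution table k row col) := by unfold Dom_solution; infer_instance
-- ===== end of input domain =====

-- B replaces A's defaultdict grouping by sorting a copy of the table and one run-length scan over the sorted list; same return value, proved equal (the input table is not mutated by either version).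


-- ===== PORT A =====
-- A: count each pattern into a defaultdict(int), then scan the (pattern, count) items,
-- taking the max count over patterns whose '0'-count cnt satisfies cnt <= k and (k - cnt) % 2 == 0.
def solution (table : List String) (k : Int) (row : Int) (col : Int) : Int :=
  let table_dic := table.foldl (fun d t => d.modify t 0 (· + 1)) (PySem.Dict.empty : PySem.Dict String Int)
  table_dic.items.foldl
    (fun answer pc =>
      let cnt : Int := PySem.Str.count pc.1 "0"
      if cnt ≤ k ∧ PySem.Int.mod (k - cnt) 2 = 0 then max answer pc.2 else answer)
    0

-- ===== PORT B =====
-- one iteration of B's loop over the sorted table; state = (prev, run, answer)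
def solutionStep (k : Int) (s : Option String × Int × Int) (t : String) : Option String × Int × Int :=
  let pr : Option String × Int := if some t = s.1 then (s.1, s.2.1 + 1) else (some t, 1)
  let cnt : Int := PySem.Str.count t "0"
  let answer := if cnt ≤ k ∧ PySem.Int.mod (k - cnt) 2 = 0 then max s.2.2 pr.2 else s.2.2
  (pr.1, pr.2, answer)

-- B: sort a copy of table, scan it once tracking the current pattern and its run length,
-- taking the max run length over eligible patterns.
def solution_alt (table : List String) (k : Int) (row : Int) (col : Int) : Int :=
  ((PySem.List.sorted table (fun x => x) false).foldl (solutionStep k) (none, 0, 0)).2.2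

-- ===== PRECONDITION & SPEC =====
def Spec_solution (table : List String) (k : Int) (row : Int) (col : Int) (out : Int) : Prop := out = solution_alt table k row col
instance (table : List String) (k : Int) (row : Int) (col : Int) (out : Int) : Decidable (Spec_solution table k row col out) := by unfold Spec_solution; infer_instance

-- ===== CLAIM (what is proved, stated in full; the proofs are below) =====
def Claim_equal_solution : Prop := ∀ (table : List String) (k : Int) (row : Int) (col : Int), Dom_solution table k row col → Spec_solution table k row col (solution table k row col)

-- ===== LEMMAS AND PROOFS =====

-- the (shared) eligibility test, as a Bool, for the proofs
def okB (k : Int) (t : String) : Bool :=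
  decide ((PySem.Str.count t "0" : Int) ≤ k ∧ PySem.Int.mod (k - (PySem.Str.count t "0" : Int)) 2 = 0)

theorem pv_step_eq (k : Int) (p : Option String) (r a : Int) (t : String) :
    solutionStep k (p, r, a) t =
      (some t, (if some t = p then r + 1 else 1),
        if okB k t then max a (if some t = p then r + 1 else 1) else a) := by
  by_cases h : some t = p
  · subst h
    by_cases h2 : okB k t <;>
      simp [solutionStep, okB, decide_eq_true_eq] at h2 ⊢ <;> simp [h2]
  · by_cases h2 : okB k t <;>
      simp [solutionStep, okB, decide_eq_true_eq, h] at h2 ⊢ <;> simp [h2]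

-- two Int lists with the same members have the same running max from a common start
theorem pv_foldl_max_eq_of_mem_iff (a : Int) (l₁ l₂ : List Int) (h : ∀ x, x ∈ l₁ ↔ x ∈ l₂) :
    l₁.foldl max a = l₂.foldl max a := by
  apply le_antisymm
  · rcases PySem.List.foldl_max_mem l₁ a with h0 | hm
    · rw [h0]; exact (PySem.List.le_foldl_max l₂ a).1
    · exact (PySem.List.le_foldl_max l₂ a).2 _ ((h _).mp hm)
  · rcases PySem.List.foldl_max_mem l₂ a with h0 | hm
    · rw [h0]; exact (PySem.List.le_foldl_max l₁ a).1
    · exact (PySem.List.le_foldl_max l₁ a).2 _ ((h _).mpr hm)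

-- continuing a run of m more copies of x
theorem pv_fold_run (k : Int) (x : String) (m : Nat) :
    ∀ (r a : Int),
      (List.replicate m x).foldl (solutionStep k) (some x, r, if okB k x then max a r else a)
        = (some x, r + m, if okB k x then max a (r + m) else a) := by
  induction m with
  | zero => intro r a; simp
  | succ m ih =>
    intro r a
    rw [List.replicate_succ, List.foldl_cons, pv_step_eq, if_pos (rfl : some x = some x)]
    have h1 : (if okB k x then max (if okB k x then max a r else a) (r + 1) else
        (if okB k x then max a r else a)) = if okB k x then max a (r + 1) else a := by
      by_cases h : okB k x
      · simp only [if_pos h, max_assoc, max_eq_right (by omega : (r:Int) ≤ r + 1)]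
      · simp only [if_neg h]
    rw [h1, ih (r + 1) a]
    simp only [Prod.mk.injEq]
    refine ⟨trivial, by push_cast; ring, ?_⟩
    by_cases h : okB k x
    · simp only [if_pos h]; congr 1; push_cast; ring
    · simp only [if_neg h]

-- a fresh run of m+1 copies of x starting from a state whose prev is not x
theorem pv_fold_run_fresh (k : Int) (x : String) (m : Nat) (p : Option String) (r a : Int)
    (hp : some x ≠ p) :
    (List.replicate (m + 1) x).foldl (solutionStep k) (p, r, a)
      = (some x, ((1:Int) + m), if okB k x then max a ((1:Int) + m) else a) := by
  rw [List.replicate_succ, List.foldl_cons, pv_step_eq, if_neg hp]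
  exact pv_fold_run k x m 1 a

-- a sorted list starts with a run of x's (its count), and everything after is strictly larger
theorem pv_run_decomp (x : String) :
    ∀ (xs : List String), (∀ b ∈ xs, x ≤ b) → xs.Pairwise (· ≤ ·) →
      xs = List.replicate (xs.count x) x ++ xs.dropWhile (fun y => y == x) ∧
        ∀ y ∈ xs.dropWhile (fun y => y == x), x < y := by
  intro xs
  induction xs with
  | nil => intro _ _; simp
  | cons y ys ih =>
    intro h1 h2
    by_cases hxy : y = x
    · subst hxy
      have h1' : ∀ b ∈ ys, y ≤ b := (List.pairwise_cons.mp h2).1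
      have h2' : ys.Pairwise (· ≤ ·) := (List.pairwise_cons.mp h2).2
      obtain ⟨hd, hgt⟩ := ih h1' h2'
      constructor
      · simp only [List.count_cons_self, List.dropWhile_cons, beq_self_eq_true, if_pos]
        rw [List.replicate_succ, List.cons_append]
        exact congrArg (y :: ·) hd
      · simpa using hgt
    · have hlt : x < y := lt_of_le_of_ne (h1 y List.mem_cons_self) (Ne.symm hxy)
      have hall : ∀ z ∈ y :: ys, x < z := by
        intro z hz
        rcases List.mem_cons.mp hz with rfl | hz'
        · exact hlt
        · exact lt_of_lt_of_le hlt ((List.pairwise_cons.mp h2).1 z hz')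
      have hcnt : (y :: ys).count x = 0 := by
        rw [List.count_eq_zero]
        intro hx
        exact absurd rfl (ne_of_gt (hall x hx))
      have hdw : (y :: ys).dropWhile (fun y => y == x) = y :: ys := by
        rw [List.dropWhile_cons_of_neg]
        simp [hxy]
      rw [hcnt, hdw]
      exact ⟨by simp, hall⟩

-- main characterisation of B's scan over a sorted list with a fresh prev
theorem pv_fold_main (k : Int) :
    ∀ (n : Nat) (l : List String), l.length ≤ n → ∀ (p : Option String) (r a : Int),
      l.Pairwise (· ≤ ·) → (∀ t ∈ l, some t ≠ p) →
      (l.foldl (solutionStep k) (p, r, a)).2.2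
        = (((PySem.List.dedup l).filter (okB k)).map (fun q => (l.count q : Int))).foldl max a := by
  intro n
  induction n with
  | zero =>
    intro l hl p r a _ _
    rw [List.length_eq_zero_iff.mp (Nat.le_zero.mp hl)]
    rfl
  | succ n ih =>
    intro l hl p r a hpair hfresh
    match l with
    | [] => rfl
    | x :: xs =>
      have h1 : ∀ b ∈ xs, x ≤ b := (List.pairwise_cons.mp hpair).1
      have h2 : xs.Pairwise (· ≤ ·) := (List.pairwise_cons.mp hpair).2
      obtain ⟨hd, hgt⟩ := pv_run_decomp x xs h1 h2
      set m := xs.count x with hm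
      set l' := xs.dropWhile (fun y => y == x) with hl'
      have hxnotin : x ∉ l' := fun hx => absurd rfl (ne_of_gt (hgt x hx))
      have hsplit : x :: xs = List.replicate (m + 1) x ++ l' := by
        rw [List.replicate_succ, List.cons_append, ← hd]
      -- LHS: run of x's, then the rest
      conv_lhs => rw [hsplit]
      rw [List.foldl_append,
          pv_fold_run_fresh k x m p r a (hfresh x List.mem_cons_self)]
      have hlen : l'.length ≤ n := by
        have h3 : l'.length ≤ xs.length := by
          rw [hl']; exact List.length_dropWhile_le _ _
        have h4 : xs.length + 1 ≤ n + 1 := by simpa [List.length_cons] using hl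
        omega
      have hpair' : l'.Pairwise (· ≤ ·) := List.Pairwise.sublist (List.dropWhile_sublist _) h2
      have hfresh' : ∀ t ∈ l', some t ≠ some x := by
        intro t ht hcontra
        exact hxnotin (Option.some.inj hcontra ▸ ht)
      rw [ih l' hlen (some x) (1 + m) (if okB k x then max a (1 + m) else a) hpair' hfresh']
      -- counts in x :: xs
      have hcx : ((x :: xs).count x : Int) = (m : Int) + 1 := by
        rw [List.count_cons_self, hm]; push_cast; ring
      have hcq : ∀ q : String, q ≠ x → (x :: xs).count q = l'.count q := by
        intro q hq
        rw [hsplit, List.count_append, List.count_replicate]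
        simp [beq_iff_eq, Ne.symm hq]
      have hmemq : ∀ q : String, q ∈ x :: xs ↔ q = x ∨ q ∈ l' := by
        intro q
        rw [hsplit]
        simp [List.mem_replicate, List.mem_append]
      -- turn the initial accumulator into an element of the fold
      have hinit : (if okB k x then max a (1 + m) else a)
          = ((if okB k x then [((1:Int) + m)] else []).foldl max a) := by
        by_cases h : okB k x <;> simp [h]
      rw [hinit, ← List.foldl_append]
      apply pv_foldl_max_eq_of_mem_iff
      intro v
      constructor
      · intro hv
        rcases List.mem_append.mp hv with hv1 | hv2
        · -- v is the run of x
          have hok : okB k x := by by_contra h; simp [h] at hv1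
          have hv1' : v = (1:Int) + m := by
            simp [hok] at hv1; exact hv1
          refine List.mem_map.mpr ⟨x, List.mem_filter.mpr ⟨?_, hok⟩, ?_⟩
          · exact (PySem.List.mem_dedup _ _).mpr List.mem_cons_self
          · rw [hcx, hv1']; ring
        · -- v comes from l'
          obtain ⟨q, hq, hveq⟩ := List.mem_map.mp hv2
          have hqmem := List.mem_filter.mp hq
          have hqin : q ∈ l' := (PySem.List.mem_dedup _ _).mp hqmem.1
          have hqne : q ≠ x := fun hcontra => hxnotin (hcontra ▸ hqin)
          refine List.mem_map.mpr ⟨q, List.mem_filter.mpr ⟨?_, hqmem.2⟩, ?_⟩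
          · exact (PySem.List.mem_dedup _ _).mpr ((hmemq q).mpr (Or.inr hqin))
          · rw [← hveq, hcq q hqne]
      · intro hv
        obtain ⟨q, hq, hveq⟩ := List.mem_map.mp hv
        have hqmem := List.mem_filter.mp hq
        have hqin : q ∈ x :: xs := (PySem.List.mem_dedup _ _).mp hqmem.1
        rcases (hmemq q).mp hqin with rfl | hqin'
        · apply List.mem_append.mpr; left
          simp [hqmem.2]
          rw [← hveq, hcx]; ring
        · have hqne : q ≠ x := fun hcontra => hxnotin (hcontra ▸ hqin')
          apply List.mem_append.mpr; right
          refine List.mem_map.mpr ⟨q, List.mem_filter.mpr ⟨?_, hqmem.2⟩, ?_⟩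
          · exact (PySem.List.mem_dedup _ _).mpr hqin'
          · rw [← hveq, hcq q hqne]

theorem pv_solution_eq (table : List String) (k : Int) (row : Int) (col : Int) :
    solution table k row col = solution_alt table k row col := by
  unfold solution solution_alt
  -- A: the defaultdict loop is Counter; its items are (pattern, count) over the deduped table
  simp only [← PySem.Dict.counter_eq_foldl, PySem.Dict.items_counter, List.foldl_map]
  rw [PySem.List.foldl_ite_eq_foldl_filter
        (p := fun t => (PySem.Str.count t "0" : Int) ≤ k ∧
              PySem.Int.mod (k - (PySem.Str.count t "0" : Int)) 2 = 0)
        (f := fun answer t => max answer ((List.count t table : Int)))]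
  rw [← List.foldl_map (f := fun t => (List.count t table : Int)) (g := max)]
  -- B: the run-length scan of the sorted table
  have hs := PySem.List.sorted_perm table (fun x => x) false
  set s := PySem.List.sorted table (fun x => x) false with hsdef
  have hpair : s.Pairwise (· ≤ ·) := PySem.List.sorted_pairwise table (fun x => x)
  have hfresh : ∀ t ∈ s, some t ≠ (none : Option String) := by intro t _; simp
  rw [pv_fold_main k s.length s le_rfl none 0 0 hpair hfresh]
  -- both sides are running maxima of lists with the same members
  apply pv_foldl_max_eq_of_mem_iff
  intro v
  constructor
  · intro hv
    obtain ⟨q, hq, hveq⟩ := List.mem_map.mp hv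
    have hqmem := List.mem_filter.mp hq
    refine List.mem_map.mpr ⟨q, List.mem_filter.mpr ⟨?_, ?_⟩, ?_⟩
    · exact (PySem.List.mem_dedup _ _).mpr
        (hs.mem_iff.mpr ((PySem.Set.mem_ofList _ _).mp hqmem.1))
    · simpa [okB] using hqmem.2
    · rw [List.Perm.count_eq hs]; exact hveq
  · intro hv
    obtain ⟨q, hq, hveq⟩ := List.mem_map.mp hv
    have hqmem := List.mem_filter.mp hq
    refine List.mem_map.mpr ⟨q, List.mem_filter.mpr ⟨?_, ?_⟩, ?_⟩
    · exact (PySem.Set.mem_ofList _ _).mpr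
        (hs.mem_iff.mp ((PySem.List.mem_dedup _ _).mp hqmem.1))
    · simpa [okB] using hqmem.2
    · rw [← List.Perm.count_eq hs]; exact hveq

-- ===== VERDICT (by name: the statement is the Claim_ definition above) =====
theorem solution_spec : Claim_equal_solution := by
  intro table k row col _
  unfold Spec_solution
  exact pv_solution_eq table k row col
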